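-- pv_equiv track=rewrite | github.com/randovania/randovania | tools/pyspy_tools.py | analyze_function_hotspots
-- ===== SOURCE A (Python) =====
-- from collections import Counter, defaultdict
--
-- def analyze_function_hotspots(traces: list[list[str]], function_name: str) -> dict[str, int]:
--     """
--     For each trace containing the function, find the deepest (most specific) frame
--     within that function and count occurrences.
--     """
--     line_counts = Counter()
--
--     for trace in traces:
--         # Find all frames in this function
--         function_frames = []
--         for i, frame in enumerate(trace):
--             if function_name in frame:
--                 function_frames.append((i, frame))
--
--         if not function_frames:
--             continue
--
--         # Get the deepest (last) frame in the function - most specific location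
--         _, deepest_frame = function_frames[-1]
--         line_counts[deepest_frame] += 1
--
--     return line_counts
-- ===== SOURCE B (Python) =====
-- from collections import Counter
--
-- def analyze_function_hotspots(traces: list[list[str]], function_name: str) -> dict[str, int]:
--     """
--     For each trace, scan backward and count the first (i.e. deepest) frame
--     containing the function name.
--     """
--     line_counts = Counter()
--     for trace in traces:
--         for frame in reversed(trace):
--             if function_name in frame:
--                 line_counts[frame] += 1
--                 break
--     return line_counts
-- ===== Notes on version B (the rewrite author's own statement) =====
-- stated objective: simpler
-- what changed: B scans each trace backward and counts the first matching frame with an early break, instead of building a list of all matching (index, frame) pairs and taking its last element.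
import Mathlib
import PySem

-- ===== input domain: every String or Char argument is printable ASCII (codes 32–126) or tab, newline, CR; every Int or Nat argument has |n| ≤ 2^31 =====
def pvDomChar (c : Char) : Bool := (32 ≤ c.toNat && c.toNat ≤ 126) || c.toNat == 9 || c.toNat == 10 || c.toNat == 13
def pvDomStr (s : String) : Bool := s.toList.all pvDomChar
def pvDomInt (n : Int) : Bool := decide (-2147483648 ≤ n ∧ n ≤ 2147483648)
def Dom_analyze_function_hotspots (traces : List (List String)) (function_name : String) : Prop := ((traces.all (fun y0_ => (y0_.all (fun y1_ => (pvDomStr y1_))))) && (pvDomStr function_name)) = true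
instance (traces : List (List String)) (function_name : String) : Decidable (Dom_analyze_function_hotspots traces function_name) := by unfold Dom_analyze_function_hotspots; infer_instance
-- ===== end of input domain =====

-- B scans each trace backward and counts the first matching frame (early break),
-- instead of A's building of the list of all matching (index, frame) pairs and taking its last.

-- ===== PORT A =====
def analyze_function_hotspots (traces : List (List String)) (function_name : String) : List (String × Int) :=
  (traces.foldl (fun line_counts trace =>
      -- function_frames = [(i, frame) for i, frame in enumerate(trace) if function_name in frame]
      let function_frames : List (Int × String) :=
        (PySem.List.enumerate trace).foldl
          (fun acc p => if PySem.Str.isIn function_name p.2 then acc ++ [p] else acc) []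
      if function_frames = [] then line_counts
      else
        match PySem.List.pyGet? function_frames (-1) with
        | some (_, deepest_frame) => line_counts.modify deepest_frame 0 (· + 1)
        | none => line_counts)
    (PySem.Dict.empty : PySem.Dict String Int)).items

-- ===== PORT B =====
-- inner 'for frame in reversed(trace): … break' loop
def pvFirstMatch (function_name : String) : List String → Option String
  | [] => none
  | frame :: rest =>
      if PySem.Str.isIn function_name frame then some frame else pvFirstMatch function_name rest

def analyze_function_hotspots_alt (traces : List (List String)) (function_name : String) : List (String × Int) :=
  (traces.foldl (fun line_counts trace =>
      match pvFirstMatch function_name trace.reverse with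
      | some frame => line_counts.modify frame 0 (· + 1)
      | none => line_counts)
    (PySem.Dict.empty : PySem.Dict String Int)).items

-- ===== PRECONDITION & SPEC =====
def Spec_analyze_function_hotspots (traces : List (List String)) (function_name : String) (out : List (String × Int)) : Prop := out = analyze_function_hotspots_alt traces function_name
instance (traces : List (List String)) (function_name : String) (out : List (String × Int)) : Decidable (Spec_analyze_function_hotspots traces function_name out) := by unfold Spec_analyze_function_hotspots; infer_instance

-- ===== CLAIM (what is proved, stated in full; the proofs are below) =====
def Claim_equal_analyze_function_hotspots : Prop := ∀ (traces : List (List String)) (function_name : String), Dom_analyze_function_hotspots traces function_name → Spec_analyze_function_hotspots traces function_name (analyze_function_hotspots traces function_name)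

-- ===== LEMMAS AND PROOFS =====

-- A's append-if loop over enumerate builds the filter of the enumeration.
theorem pv_frames_eq_filter (fn : String) (trace : List String) :
    (PySem.List.enumerate trace).foldl
        (fun acc p => if PySem.Str.isIn fn p.2 then acc ++ [p] else acc) [] =
      (PySem.List.enumerate trace).filter (fun p => PySem.Str.isIn fn p.2) := by
  simpa using PySem.List.foldl_append_if_eq_filter (fun p => PySem.Str.isIn fn p.2)
    (PySem.List.enumerate trace) []

-- B's backward scan is find? on the reversed list.
theorem pv_firstMatch_eq_find? (fn : String) (l : List String) :
    pvFirstMatch fn l = l.find? (fun f => PySem.Str.isIn fn f) := by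
  induction l with
  | nil => rfl
  | cons a t ih => simp [pvFirstMatch, List.find?, ih]; split <;> simp_all

-- last of the filtered list = first match of the reversed list
theorem pv_getLast?_filter_eq_find?_reverse {α : Type} (q : α → Bool) (l : List α) :
    (l.filter q).getLast? = l.reverse.find? q := by
  induction l with
  | nil => rfl
  | cons a t ih =>
    rw [List.reverse_cons, List.find?_append, ← ih]
    by_cases h : q a = true <;> cases hl : (t.filter q).getLast? <;>
      simp_all [List.getLast?_cons]

-- projecting the filtered enumeration to frames drops the indices
theorem pv_map_snd_filter_enumerate (q : String → Bool) :
    ∀ (l : List String) (s : Int),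
      ((PySem.List.enumerate l s).filter (fun p => q p.2)).map (·.2) = l.filter q
  | [], _ => rfl
  | a :: t, s => by
      simp only [PySem.List.enumerate_cons, List.filter_cons]
      by_cases h : q a = true <;>
        simp [h, pv_map_snd_filter_enumerate q t (s + 1)]

-- the per-trace picks agree
theorem pv_pick_eq (fn : String) (trace : List String) :
    (((PySem.List.enumerate trace).filter (fun p => PySem.Str.isIn fn p.2)).getLast?).map (·.2) =
      pvFirstMatch fn trace.reverse := by
  rw [pv_firstMatch_eq_find?, ← pv_getLast?_filter_eq_find?_reverse, ← List.getLast?_map]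
  congr 1
  exact pv_map_snd_filter_enumerate (fun f => PySem.Str.isIn fn f) trace 0

-- the two per-trace loop bodies agree
theorem pv_step_eq (fn : String) (d : PySem.Dict String Int) (trace : List String) :
    (let function_frames : List (Int × String) :=
        (PySem.List.enumerate trace).foldl
          (fun acc p => if PySem.Str.isIn fn p.2 then acc ++ [p] else acc) []
     if function_frames = [] then d
     else
       match PySem.List.pyGet? function_frames (-1) with
       | some (_, deepest_frame) => d.modify deepest_frame 0 (· + 1)
       | none => d) =
    (match pvFirstMatch fn trace.reverse with
     | some frame => d.modify frame 0 (· + 1)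
     | none => d) := by
  simp only [pv_frames_eq_filter, PySem.List.pyGet?_neg_one]
  have hp := pv_pick_eq fn trace
  cases h : ((PySem.List.enumerate trace).filter (fun p => PySem.Str.isIn fn p.2)).getLast? with
  | none =>
      rw [h] at hp
      simp [← hp]
  | some p =>
      rw [h] at hp
      obtain ⟨i, f⟩ := p
      have hmem := List.mem_filter.mp (List.mem_of_getLast? h)
      simp [← hp]
      intro hall
      have := hall i f hmem.1
      have h2 := hmem.2
      simp_all [PySem.Str.isIn]

-- ===== VERDICT (by name: the statement is the Claim_ definition above) =====
theorem analyze_function_hotspots_spec : Claim_equal_analyze_function_hotspots := by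
  intro traces fn _
  unfold Spec_analyze_function_hotspots analyze_function_hotspots analyze_function_hotspots_alt
  congr 2
  funext d trace
  exact pv_step_eq fn d trace
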